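-- pv_equiv track=rewrite | github.com/massimoparzanese/Entrega_12_4_Seminario | Calcular/__init__.py | mas_influyente
-- ===== SOURCE A (Python) =====
-- def influencia_total(goles,numero1,goles_evitados,numero2,asis,numero3):
--     """Esta funcion lo que hace es: multiplicar los valores goles, goles_evitados y asistencias, por el numero correspondiente
--     por el que debo multiplicarlo. Que en este caso son: numero1, numero2 y numero3.
--     Y retorna en la variable total la suma de los 3 ya multiplicados por las variables.
--     La utilizo para el inciso 3, la hago aparte de la funcion principal para mayor legibilidad"""
--
--     goles = goles * numero1
--     goles_evitados = goles_evitados * numero2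
--     asis = asis * numero3
--     tot = goles + goles_evitados + asis
--     return tot
--
-- def mas_influyente(influencia,lista_jugadores):
--     """Esta funcion recibe por parametro una tupla llamada influencia y una lista de diccionarios de los jugadores del club.
--     La tupla me servirá para resolver el sub-inciso 3, la tupla tiene los valores para sacar la influencia de cada jugador segun
--     sus goles, goles evitados y asistencias(en el mismo orden que estan escritos acá, estan guardados en la tupla). Lo primero que hago es declarar la variable max, para ir comparando a medida que recorro la lista
--     y jugador será la variable donde guadaré cual fue dicho jugador. En el for solo recorro, llamo a la funcion influencia_total, que me devuelve
--     el valor a comparar y luego comparo si es mayor al maximo o no, esta funcion retorna el jugador mas influyente"""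
--     max = -1
--     jugador = [{}]
--     for i in lista_jugadores:
--         total = influencia_total(i["goles"],influencia[0],i["goles evitados"],influencia[1],i["asistencias"],influencia[2])
--         if total > max :
--             max = total
--             jugador[0] = i
--     return jugador
-- ===== SOURCE B (Python) =====
-- def influencia_total(goles,numero1,goles_evitados,numero2,asis,numero3):
--     goles = goles * numero1
--     goles_evitados = goles_evitados * numero2
--     asis = asis * numero3
--     tot = goles + goles_evitados + asis
--     return tot
--
-- def mas_influyente(influencia, lista_jugadores):
--     # table-then-reduce: build all weighted scores first, then pick the best
--     scores = [influencia_total(j["goles"], influencia[0],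
--                                j["goles evitados"], influencia[1],
--                                j["asistencias"], influencia[2])
--               for j in lista_jugadores]
--     best = max(scores, default=-1)
--     if best > -1:
--         return [lista_jugadores[scores.index(best)]]
--     return [{}]
-- ===== Notes on version B (the rewrite author's own statement) =====
-- stated objective: simpler
-- what changed: Replaces A's fused track-as-you-go max loop (running max + mutated jugador slot) with a table-then-reduce decomposition: build the list of weighted scores with a comprehension, take max(scores, default=-1), and return the first player at that score via scores.index, or [{}] when the maximum is not above the -1 sentinel.
import Mathlib
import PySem

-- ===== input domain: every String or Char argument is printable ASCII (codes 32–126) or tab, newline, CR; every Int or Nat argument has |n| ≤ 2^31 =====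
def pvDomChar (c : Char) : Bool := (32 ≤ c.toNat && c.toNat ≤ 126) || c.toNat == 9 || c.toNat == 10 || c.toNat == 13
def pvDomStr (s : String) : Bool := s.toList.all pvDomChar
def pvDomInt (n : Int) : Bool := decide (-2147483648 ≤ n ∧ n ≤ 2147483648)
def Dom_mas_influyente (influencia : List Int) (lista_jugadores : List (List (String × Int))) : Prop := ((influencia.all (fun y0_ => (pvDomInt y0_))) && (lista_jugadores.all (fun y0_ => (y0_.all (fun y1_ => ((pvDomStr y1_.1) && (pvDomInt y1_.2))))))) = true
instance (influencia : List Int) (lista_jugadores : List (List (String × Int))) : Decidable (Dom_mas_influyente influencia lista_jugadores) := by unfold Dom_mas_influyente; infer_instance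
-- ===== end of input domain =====

-- B replaces A's fused running-max loop by a table-then-reduce decomposition (scores list, max, first index); same O(n) cost, simpler shape; return-value equivalence only (both return the same player dict).

-- ===== PORT A =====
def influencia_total (goles : Int) (numero1 : Int) (goles_evitados : Int) (numero2 : Int) (asis : Int) (numero3 : Int) : Int :=
  let goles := goles * numero1
  let goles_evitados := goles_evitados * numero2
  let asis := asis * numero3
  let tot := goles + goles_evitados + asis
  tot

-- the call 'influencia_total(i["goles"], influencia[0], …)' both Pythons make, verbatim;
-- the .getD 0 defaults fire only where Python raises KeyError/IndexError (excluded by Pre_)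
def pvTotal (influencia : List Int) (i : List (String × Int)) : Int :=
  influencia_total ((PySem.Dict.get? (PySem.Dict.mk i) "goles").getD 0)
    ((PySem.List.pyGet? influencia 0).getD 0)
    ((PySem.Dict.get? (PySem.Dict.mk i) "goles evitados").getD 0)
    ((PySem.List.pyGet? influencia 1).getD 0)
    ((PySem.Dict.get? (PySem.Dict.mk i) "asistencias").getD 0)
    ((PySem.List.pyGet? influencia 2).getD 0)

-- A's for-loop: running max (starting at -1) and the mutated one-slot list jugador
def masLoop (influencia : List Int) (m : Int) (jugador : List (List (String × Int))) :
    List (List (String × Int)) → Int × List (List (String × Int))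
  | [] => (m, jugador)
  | i :: rest =>
    let total := pvTotal influencia i
    if total > m then masLoop influencia total (jugador.set 0 i) rest
    else masLoop influencia m jugador rest

def mas_influyente (influencia : List Int) (lista_jugadores : List (List (String × Int))) : List (List (String × Int)) :=
  (masLoop influencia (-1) [[]] lista_jugadores).2

-- ===== PORT B =====
def mas_influyente_alt (influencia : List Int) (lista_jugadores : List (List (String × Int))) : List (List (String × Int)) :=
  let scores := lista_jugadores.map (fun j => pvTotal influencia j)
  let best := (PySem.List.max? scores (fun x => x)).getD (-1)
  if best > -1 then
    [(PySem.List.pyGet? lista_jugadores (((PySem.List.index? scores best).getD 0 : Nat) : Int)).getD []]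
  else [[]]

-- ===== PRECONDITION & SPEC =====
-- Pre_ excludes exactly the inputs on which Python A raises: a nonempty player list with
-- len(influencia) < 3 (IndexError) or a player dict missing one of the three keys (KeyError);
-- on an empty player list A returns [{}] whatever influencia is, so that stays inside Pre_.
def Pre_mas_influyente (influencia : List Int) (lista_jugadores : List (List (String × Int))) : Prop :=
  lista_jugadores = [] ∨ (3 ≤ influencia.length ∧ ∀ j ∈ lista_jugadores,
    PySem.Dict.contains (PySem.Dict.mk j) "goles" = true ∧
    PySem.Dict.contains (PySem.Dict.mk j) "goles evitados" = true ∧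
    PySem.Dict.contains (PySem.Dict.mk j) "asistencias" = true)
instance (influencia : List Int) (lista_jugadores : List (List (String × Int))) : Decidable (Pre_mas_influyente influencia lista_jugadores) := by unfold Pre_mas_influyente; infer_instance

def pvWitness_mas_influyente : List Int × (List (List (String × Int))) :=
  ([1, 2, 3], [[("goles", 1), ("goles evitados", 2), ("asistencias", 3)]])

def Spec_mas_influyente (influencia : List Int) (lista_jugadores : List (List (String × Int))) (out : List (List (String × Int))) : Prop := out = mas_influyente_alt influencia lista_jugadores
instance (influencia : List Int) (lista_jugadores : List (List (String × Int))) (out : List (List (String × Int))) : Decidable (Spec_mas_influyente influencia lista_jugadores out) := by unfold Spec_mas_influyente; infer_instance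

-- ===== CLAIM (what is proved, stated in full; the proofs are below) =====
def Claim_equal_mas_influyente : Prop := ∀ (influencia : List Int) (lista_jugadores : List (List (String × Int))), Dom_mas_influyente influencia lista_jugadores → Pre_mas_influyente influencia lista_jugadores → Spec_mas_influyente influencia lista_jugadores (mas_influyente influencia lista_jugadores)

-- ===== LEMMAS AND PROOFS =====

-- the final jugador of A's loop: the first element achieving the final running max, if any update fires
def pvPick (influencia : List Int) : List (List (String × Int)) → Int → Option (List (String × Int))
  | [], _ => none
  | x :: xs, m =>
    if pvTotal influencia x > m then some ((pvPick influencia xs (pvTotal influencia x)).getD x)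
    else pvPick influencia xs m

theorem pv_self_le_foldl_max : ∀ (l : List Int) (a : Int), a ≤ l.foldl max a := by
  intro l
  induction l with
  | nil => intro a; simp
  | cons x t ih => intro a; exact le_trans (le_max_left a x) (ih (max a x))

theorem pv_foldl_max_mem : ∀ (l : List Int) (a : Int), l.foldl max a = a ∨ l.foldl max a ∈ l := by
  intro l
  induction l with
  | nil => intro a; left; rfl
  | cons x t ih =>
    intro a
    rcases ih (max a x) with h | h
    · rcases le_total a x with hx | hx
      · right
        have hx2 : List.foldl max a (x :: t) = x := by
          simpa [List.foldl, max_eq_right hx] using h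
        rw [hx2]; exact List.mem_cons_self
      · left
        simpa [List.foldl, max_eq_left hx] using h
    · right; exact List.mem_cons_of_mem _ (by simpa [List.foldl] using h)

theorem pv_foldl_max_init (l : List Int) : ∀ (a b : Int), l.foldl max (max a b) = max a (l.foldl max b) := by
  induction l with
  | nil => intro a b; rfl
  | cons x t ih =>
    intro a b
    simp only [List.foldl]
    rw [max_assoc, ih]

theorem masLoop_eq (influencia : List Int) : ∀ (xs : List (List (String × Int))) (m : Int) (j : List (List (String × Int))),
    masLoop influencia m j xs =
      ((xs.map (pvTotal influencia)).foldl max m,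
        match pvPick influencia xs m with
        | none => j
        | some p => j.set 0 p) := by
  intro xs
  induction xs with
  | nil => intro m j; rfl
  | cons x t ih =>
    intro m j
    simp only [masLoop, pvPick, List.map, List.foldl]
    by_cases h : pvTotal influencia x > m
    · rw [if_pos h, if_pos h, ih, max_eq_right (le_of_lt h)]
      cases hp : pvPick influencia t (pvTotal influencia x) with
      | none => simp
      | some p => simp [List.set_set]
    · rw [if_neg h, if_neg h, ih,
        max_eq_left (by omega : pvTotal influencia x ≤ m)]

theorem pvPick_spec (influencia : List Int) : ∀ (xs : List (List (String × Int))) (m : Int),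
    pvPick influencia xs m =
      if (xs.map (pvTotal influencia)).foldl max m > m then
        xs.find? (fun x => pvTotal influencia x == (xs.map (pvTotal influencia)).foldl max m)
      else none := by
  intro xs
  induction xs with
  | nil => intro m; simp [pvPick]
  | cons x t ih =>
    intro m
    simp only [List.map, List.foldl]
    by_cases h : pvTotal influencia x > m
    · rw [max_eq_right (le_of_lt h)]
      simp only [pvPick, if_pos h]
      set M := (t.map (pvTotal influencia)).foldl max (pvTotal influencia x) with hM
      by_cases h2 : M > pvTotal influencia x
      · rw [if_pos (lt_trans h h2)]
        have hmem : M ∈ t.map (pvTotal influencia) := by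
          rcases pv_foldl_max_mem (t.map (pvTotal influencia)) (pvTotal influencia x) with he | he
          · omega
          · exact he
        obtain ⟨y, hy, hsy⟩ := List.mem_map.mp hmem
        have hsome : (t.find? (fun z => pvTotal influencia z == M)).isSome :=
          List.find?_isSome.mpr ⟨y, hy, by simp [hsy]⟩
        obtain ⟨p, hp⟩ := Option.isSome_iff_exists.mp hsome
        rw [List.find?_cons_of_neg (by simp; omega)]
        rw [ih (pvTotal influencia x), if_pos h2, ← hM, hp]
        rfl
      · have hMe : M = pvTotal influencia x :=
          le_antisymm (by omega) (pv_self_le_foldl_max _ _)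
        rw [if_pos (by omega)]
        rw [List.find?_cons_of_pos (by simp [hMe])]
        rw [ih (pvTotal influencia x), if_neg h2]
        rfl
    · rw [max_eq_left (by omega : pvTotal influencia x ≤ m)]
      rw [pvPick, if_neg h, ih m]
      by_cases h3 : (t.map (pvTotal influencia)).foldl max m > m
      · rw [if_pos h3, if_pos h3,
          List.find?_cons_of_neg (by simp; omega)]
      · rw [if_neg h3, if_neg h3]

theorem pv_index_get (influencia : List Int) : ∀ (xs : List (List (String × Int))) (v : Int),
    v ∈ xs.map (pvTotal influencia) →
    PySem.List.pyGet? xs (((PySem.List.index? (xs.map (pvTotal influencia)) v).getD 0 : Nat) : Int)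
      = xs.find? (fun x => pvTotal influencia x == v) := by
  intro xs
  induction xs with
  | nil => intro v hv; simp at hv
  | cons x t ih =>
    intro v hv
    by_cases h : pvTotal influencia x = v
    · rw [List.map_cons, h, PySem.List.index?_cons_self]
      rw [List.find?_cons_of_pos (by simp [h])]
      simp
    · have hv' : v ∈ t.map (pvTotal influencia) := by
        rcases List.mem_map.mp hv with ⟨y, hy, hs⟩
        rcases List.mem_cons.mp hy with rfl | hy'
        · exact absurd hs h
        · exact List.mem_map.mpr ⟨y, hy', hs⟩
      rw [List.map_cons, PySem.List.index?_cons_of_ne _ (by simpa using h)]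
      obtain ⟨k, hk⟩ := Option.isSome_iff_exists.mp
        ((PySem.List.index?_isSome_iff _ _).mpr hv')
      rw [List.find?_cons_of_neg (by simp [h])]
      have := ih v hv'
      rw [hk] at this ⊢
      simp only [Option.map_some, Option.getD_some] at this ⊢
      rw [PySem.List.pyGet?_natCast] at this ⊢
      simpa using this

-- ===== VERDICT (by name: the statement is the Claim_ definition above) =====
theorem mas_influyente_spec : Claim_equal_mas_influyente := by
  intro influencia lista_jugadores _ _
  unfold Spec_mas_influyente mas_influyente mas_influyente_alt
  cases lista_jugadores with
  | nil => rfl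
  | cons x t =>
    simp only [List.map_cons, PySem.List.max?_id_cons, Option.getD_some]
    rw [masLoop_eq, pvPick_spec]
    set M := ((t.map (pvTotal influencia)).foldl max (pvTotal influencia x)) with hM
    have hinit : ((x :: t).map (pvTotal influencia)).foldl max (-1) = max (-1) M := by
      rw [hM]
      simp only [List.map_cons, List.foldl]
      rw [← pv_foldl_max_init]
    by_cases hb : M > -1
    · rw [if_pos hb]
      simp only [List.map_cons] at hinit ⊢
      rw [hinit, max_eq_right (le_of_lt hb)]
      rw [if_pos hb]
      have hmem : M ∈ (x :: t).map (pvTotal influencia) := by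
        rcases pv_foldl_max_mem (t.map (pvTotal influencia)) (pvTotal influencia x) with he | he
        · rw [← hM] at he
          rw [List.map_cons, he]; exact List.mem_cons_self
        · rw [← hM] at he
          rw [List.map_cons]; exact List.mem_cons_of_mem _ he
      obtain ⟨y, hy, hsy⟩ := List.mem_map.mp hmem
      have hsome : ((x :: t).find? (fun z => pvTotal influencia z == M)).isSome :=
        List.find?_isSome.mpr ⟨y, hy, by simp [hsy]⟩
      obtain ⟨p, hp⟩ := Option.isSome_iff_exists.mp hsome
      have hig := pv_index_get influencia (x :: t) M hmem
      rw [List.map_cons] at hig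
      rw [hig, hp]
      simp
    · rw [if_neg hb]
      rw [hinit, max_eq_left (by omega)]
      rw [if_neg (by omega)]
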